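-- pv_equiv track=rewrite | github.com/Eluee/python | solution/chapter_5/solution5_1.py | solution
-- ===== SOURCE A (Python) =====
-- def solution(ladders, win):
--    for i in range(1, 7):
--         temp = i
--         for brige_index in range(len(ladders)):
--             if ladders[brige_index][0] == temp:
--                 temp = ladders[brige_index][1]
--                 continue
--             if ladders[brige_index][1] == temp:
--                 temp = ladders[brige_index][0]
--                 continue
--         if temp == win:
--             return i
-- ===== SOURCE B (Python) =====
-- def solution(ladders, win):
--     # Each ladder is an involutive swap, so the whole walk is a bijection:
--     # run it backwards once from `win` instead of forward-simulating 1..6.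
--     value = win
--     for ladder in reversed(ladders):
--         if ladder[0] == value:
--             value = ladder[1]
--         elif ladder[1] == value:
--             value = ladder[0]
--     if 1 <= value <= 6:
--         return value
-- ===== Notes on version B (the rewrite author's own statement) =====
-- stated objective: faster
-- what changed: Replaces the six forward simulations (one per die roll) by a single backward pass: since every ladder step is an involutive swap, the walk is a bijection and the answer is the unique preimage of win, returned iff it lies in 1..6.
import Mathlib
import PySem

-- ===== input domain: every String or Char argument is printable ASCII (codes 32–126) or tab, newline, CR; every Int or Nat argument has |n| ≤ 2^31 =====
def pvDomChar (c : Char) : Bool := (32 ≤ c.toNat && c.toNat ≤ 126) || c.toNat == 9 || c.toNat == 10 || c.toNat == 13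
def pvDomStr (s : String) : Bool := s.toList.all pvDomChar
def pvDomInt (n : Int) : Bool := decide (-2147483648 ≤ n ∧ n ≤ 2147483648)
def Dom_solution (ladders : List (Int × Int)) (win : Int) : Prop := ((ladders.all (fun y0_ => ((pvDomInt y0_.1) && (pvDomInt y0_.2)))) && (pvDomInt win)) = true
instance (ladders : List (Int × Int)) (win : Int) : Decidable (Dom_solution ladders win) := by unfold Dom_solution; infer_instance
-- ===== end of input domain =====

-- B replaces A's six forward simulations by one backward pass (each ladder is an involutive swap,
-- so the walk is a bijection and the answer is the unique preimage of win), a constant-factor speedup.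


-- ===== PORT A =====
-- one ladder step of A's inner loop (the two sequential ifs with `continue`)
def ladderStep (temp : Int) (lad : Int × Int) : Int :=
  if lad.1 = temp then lad.2
  else if lad.2 = temp then lad.1
  else temp

-- A's outer loop: try each die roll in order, return the first that reaches win
def solutionLoop (ladders : List (Int × Int)) (win : Int) : List Int → Option Int
  | [] => none
  | i :: rest =>
      if ladders.foldl ladderStep i = win then some i
      else solutionLoop ladders win rest

def solution (ladders : List (Int × Int)) (win : Int) : Option Int :=
  solutionLoop ladders win (PySem.List.pyRange 1 7 1)

-- ===== PORT B =====
def solution_alt (ladders : List (Int × Int)) (win : Int) : Option Int :=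
  let value := ladders.reverse.foldl
    (fun v lad => if lad.1 = v then lad.2 else if lad.2 = v then lad.1 else v) win
  if 1 ≤ value ∧ value ≤ 6 then some value else none

-- ===== PRECONDITION & SPEC =====
def Spec_solution (ladders : List (Int × Int)) (win : Int) (out : Option Int) : Prop := out = solution_alt ladders win
instance (ladders : List (Int × Int)) (win : Int) (out : Option Int) : Decidable (Spec_solution ladders win out) := by unfold Spec_solution; infer_instance

-- ===== CLAIM (what is proved, stated in full; the proofs are below) =====
def Claim_equal_solution : Prop := ∀ (ladders : List (Int × Int)) (win : Int), Dom_solution ladders win → Spec_solution ladders win (solution ladders win)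

-- ===== LEMMAS AND PROOFS =====

-- one ladder step is an involution
theorem ladderStep_invol (x : Int) (p : Int × Int) : ladderStep (ladderStep x p) p = x := by
  obtain ⟨a, b⟩ := p
  simp only [ladderStep]
  split_ifs <;> omega

-- running the walk backwards undoes running it forwards
theorem foldl_reverse_foldl (l : List (Int × Int)) (x : Int) :
    l.reverse.foldl ladderStep (l.foldl ladderStep x) = x := by
  induction l generalizing x with
  | nil => simp
  | cons p t ih =>
      simp only [List.reverse_cons, List.foldl_append, List.foldl]
      rw [ih, ladderStep_invol]

-- and forwards undoes backwards
theorem foldl_foldl_reverse (l : List (Int × Int)) (x : Int) :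
    l.foldl ladderStep (l.reverse.foldl ladderStep x) = x := by
  have := foldl_reverse_foldl l.reverse x
  simpa using this

-- forward walk hits win iff the start is the backward image of win
theorem fwd_eq_iff (l : List (Int × Int)) (win i : Int) :
    l.foldl ladderStep i = win ↔ i = l.reverse.foldl ladderStep win := by
  constructor
  · intro h; rw [← h, foldl_reverse_foldl]
  · intro h; rw [h, foldl_foldl_reverse]

theorem solutionLoop_eq (ladders : List (Int × Int)) (win : Int) (is : List Int) :
    solutionLoop ladders win is =
      (if ladders.reverse.foldl ladderStep win ∈ is
       then some (ladders.reverse.foldl ladderStep win) else none) := by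
  set v := ladders.reverse.foldl ladderStep win with hv
  induction is with
  | nil => simp [solutionLoop]
  | cons i rest ih =>
      simp only [solutionLoop, ih, List.mem_cons]
      by_cases hi : i = v
      · rw [if_pos ((fwd_eq_iff ladders win i).mpr (hi.trans hv)), hi,
            if_pos (Or.inl rfl)]
      · rw [if_neg (fun h => hi ((fwd_eq_iff ladders win i).mp h))]
        by_cases hm : v ∈ rest
        · rw [if_pos hm, if_pos (Or.inr hm)]
        · rw [if_neg hm, if_neg (by tauto)]

-- ===== VERDICT (by name: the statement is the Claim_ definition above) =====
theorem solution_spec : Claim_equal_solution := by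
  intro ladders win _
  unfold Spec_solution solution solution_alt
  have hr : PySem.List.pyRange 1 7 1 = [1, 2, 3, 4, 5, 6] := by decide
  rw [hr, solutionLoop_eq]
  set v := ladders.reverse.foldl
    (fun v lad => if lad.1 = v then lad.2 else if lad.2 = v then lad.1 else v) win with hv
  have hvv : ladders.reverse.foldl ladderStep win = v := rfl
  rw [hvv]
  simp only [List.mem_cons, List.not_mem_nil, or_false]
  by_cases h : 1 ≤ v ∧ v ≤ 6
  · rw [if_pos (by omega), if_pos h]
  · rw [if_neg (by omega), if_neg h]
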